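-- pv_equiv track=rewrite | github.com/server2040/python_teach_SigmaSoftware | teach4/teach4_z3.py | ret_word_isaldijit
-- ===== SOURCE A (Python) =====
-- def ret_word_isaldijit(s: str) -> list:
--     '''
--     This is a function that takes a string and returns
--     a list of words from this line, only which
--     contain both numbers and letters
--     '''
--
--     words_all = s.split(' ')
--     words_aldijit = []
--
--     for word in words_all:
--
--         digit_exist = False
--         alpha_exist = False
--
--         for char in word:
--
--             if char.isalpha():
--                 alpha_exist = True
--
--             elif char.isdigit():
--                 digit_exist = True
--
--             if alpha_exist and digit_exist:
--                 words_aldijit.append(word)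
--                 break
--
--     return words_aldijit
-- ===== SOURCE B (Python) =====
-- def ret_word_isaldijit(s: str) -> list:
--     # Single streaming pass over the characters: build the current word and its
--     # letter/digit flags on the fly, emit the word at each space boundary.
--     result = []
--     word_chars = []
--     has_alpha = False
--     has_digit = False
--     for ch in s:
--         if ch == ' ':
--             if has_alpha and has_digit:
--                 result.append(''.join(word_chars))
--             word_chars = []
--             has_alpha = False
--             has_digit = False
--         else:
--             word_chars.append(ch)
--             if ch.isalpha():
--                 has_alpha = True
--             elif ch.isdigit():
--                 has_digit = True
--     if has_alpha and has_digit: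
--         result.append(''.join(word_chars))
--     return result
-- ===== Notes on version B (the rewrite author's own statement) =====
-- stated objective: alternative
-- what changed: Replaces split-into-a-word-list followed by a fused two-flag scan of each word with a single character-level streaming state machine that builds the current word and its letter/digit flags on the fly and emits qualifying words at each space boundary (no split, no per-word rescans).
import Mathlib
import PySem

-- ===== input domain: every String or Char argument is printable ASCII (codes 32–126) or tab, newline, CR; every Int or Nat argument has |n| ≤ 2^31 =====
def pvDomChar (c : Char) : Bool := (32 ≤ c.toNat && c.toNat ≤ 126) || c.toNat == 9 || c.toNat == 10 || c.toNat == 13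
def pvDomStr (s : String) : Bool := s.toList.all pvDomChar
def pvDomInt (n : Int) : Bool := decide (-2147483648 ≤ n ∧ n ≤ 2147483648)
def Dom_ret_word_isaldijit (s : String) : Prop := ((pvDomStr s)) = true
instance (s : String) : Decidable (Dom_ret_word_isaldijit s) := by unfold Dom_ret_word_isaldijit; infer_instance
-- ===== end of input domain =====

-- B replaces A's split-then-scan-each-word loop by a single character-level streaming
-- state machine that builds words and their letter/digit flags on the fly (objective: alternative).

-- ===== PORT A =====
-- inner 'for char in word' loop of A: carries the two flags, returns true iff it appends (and breaks)
def pvInnerA : List Char → Bool → Bool → Bool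
  | [], _, _ => false
  | c :: cs, alpha_exist, digit_exist =>
      let alpha' := if PySem.Chars.isalpha c then true else alpha_exist
      let digit' := if PySem.Chars.isalpha c then digit_exist
                    else if PySem.Chars.isdigit c then true else digit_exist
      if alpha' && digit' then true else pvInnerA cs alpha' digit'

def ret_word_isaldijit (s : String) : List String :=
  let words_all := (PySem.Str.split? s " ").getD []
  words_all.foldl (fun words_aldijit word =>
    if pvInnerA word.toList false false then words_aldijit ++ [word] else words_aldijit) []

-- ===== PORT B =====
-- loop body of B: state = (result, word_chars, has_alpha, has_digit)
def pvStepB (st : List String × List Char × Bool × Bool) (ch : Char) :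
    List String × List Char × Bool × Bool :=
  let (result, word_chars, has_alpha, has_digit) := st
  if ch = ' ' then
    ((if has_alpha && has_digit then result ++ [String.ofList word_chars] else result),
     [], false, false)
  else
    let word_chars' := word_chars ++ [ch]
    if PySem.Chars.isalpha ch then (result, word_chars', true, has_digit)
    else if PySem.Chars.isdigit ch then (result, word_chars', has_alpha, true)
    else (result, word_chars', has_alpha, has_digit)

def ret_word_isaldijit_alt (s : String) : List String :=
  let (result, word_chars, has_alpha, has_digit) :=
    s.toList.foldl pvStepB ([], [], false, false)
  if has_alpha && has_digit then result ++ [String.ofList word_chars] else result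

-- ===== PRECONDITION & SPEC =====
def Spec_ret_word_isaldijit (s : String) (out : List String) : Prop := out = ret_word_isaldijit_alt s
instance (s : String) (out : List String) : Decidable (Spec_ret_word_isaldijit s out) := by unfold Spec_ret_word_isaldijit; infer_instance

-- ===== CLAIM (what is proved, stated in full; the proofs are below) =====
def Claim_equal_ret_word_isaldijit : Prop := ∀ (s : String), Dom_ret_word_isaldijit s → Spec_ret_word_isaldijit s (ret_word_isaldijit s)

-- ===== LEMMAS AND PROOFS =====

-- structural splitter on a single space, used only by the proofs:
-- pvSplit cs = (first word, remaining words) of cs split on ' '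
def pvSplit : List Char → List Char × List (List Char)
  | [] => ([], [])
  | c :: cs =>
      let (w, ws) := pvSplit cs
      if c = ' ' then ([], w :: ws) else (c :: w, ws)

def pvPred (w : List Char) : Bool :=
  w.any PySem.Chars.isalpha && w.any PySem.Chars.isdigit

-- the flush at a word boundary / at the end of B's loop, as a function of the state
def pvFinish (st : List String × List Char × Bool × Bool) : List String :=
  if st.2.2.1 && st.2.2.2 then st.1 ++ [String.ofList st.2.1] else st.1

-- no ASCII character is both a letter and a digit
theorem pv_alpha_digit_disjoint (c : Char) (h : PySem.Chars.isalpha c = true) :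
    PySem.Chars.isdigit c = false := by
  have eA : 'A'.val.toNat = 65 := rfl
  have eZ : 'Z'.val.toNat = 90 := rfl
  have ea : 'a'.val.toNat = 97 := rfl
  have ez : 'z'.val.toNat = 122 := rfl
  have e0 : '0'.val.toNat = 48 := rfl
  have e9 : '9'.val.toNat = 57 := rfl
  simp only [PySem.Chars.isalpha, PySem.Chars.isupper, PySem.Chars.islower,
        PySem.Chars.isdigit, Bool.or_eq_true, Bool.and_eq_true, decide_eq_true_eq,
        Bool.and_eq_false_iff, decide_eq_false_iff_not, not_le,
        Char.le_def, UInt32.le_iff_toNat_le] at *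
  omega

theorem pvInnerA_eq (cs : List Char) :
    ∀ a d, (a && d) = false →
      pvInnerA cs a d = ((a || cs.any PySem.Chars.isalpha) && (d || cs.any PySem.Chars.isdigit)) := by
  induction cs with
  | nil => intro a d h; simp [pvInnerA, h]
  | cons c cs ih =>
    intro a d h
    by_cases hα : PySem.Chars.isalpha c = true
    · have hδ := pv_alpha_digit_disjoint c hα
      by_cases hd : d = true
      · simp [pvInnerA, hα, hδ, hd]
      · have hd' : d = false := by simpa using hd
        subst hd'
        simp [pvInnerA, hα, hδ, ih true false (by simp)]
    · have hα' : PySem.Chars.isalpha c = false := by simpa using hα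
      by_cases hδ : PySem.Chars.isdigit c = true
      · by_cases ha : a = true
        · simp [pvInnerA, hα', hδ, ha]
        · have ha' : a = false := by simpa using ha
          subst ha'
          simp [pvInnerA, hα', hδ, ih false true (by simp)]
      · have hδ' : PySem.Chars.isdigit c = false := by simpa using hδ
        simp [pvInnerA, hα', hδ', h, ih a d h]

-- PySem's fuel-based splitter agrees with the structural pvSplit for the one-char separator ' '
theorem pv_splitOn_go_eq (fuel : Nat) :
    ∀ (l cur : List Char) (acc : List (List Char)), l.length < fuel →
      PySem.Chars.splitOn.go [' '] fuel l cur acc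
        = acc.reverse ++ ((cur.reverse ++ (pvSplit l).1) :: (pvSplit l).2) := by
  induction fuel with
  | zero => intro l cur acc h; omega
  | succ fuel ih =>
    intro l cur acc h
    cases l with
    | nil => simp [PySem.Chars.splitOn.go, pvSplit]
    | cons c rest =>
      by_cases hc : c = ' '
      · subst hc
        have hpre : [' '].isPrefixOf (' ' :: rest) = true := by
          simp [List.isPrefixOf]
        simp only [PySem.Chars.splitOn.go, hpre, if_true, List.length_cons,
          List.drop_succ_cons, List.length_nil, List.drop_zero]
        rw [ih rest [] (cur.reverse :: acc) (by simp at h ⊢; omega)]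
        simp [pvSplit]
      · have hpre : [' '].isPrefixOf (c :: rest) = false := by
          simp [List.isPrefixOf]
          exact Ne.symm hc
        simp only [PySem.Chars.splitOn.go, hpre, Bool.false_eq_true, if_false]
        rw [ih rest (c :: cur) acc (by simp at h ⊢; omega)]
        simp [pvSplit, hc]

theorem pv_splitOn_eq (cs : List Char) :
    PySem.Chars.splitOn cs [' '] = (pvSplit cs).1 :: (pvSplit cs).2 := by
  unfold PySem.Chars.splitOn
  rw [pv_splitOn_go_eq (cs.length + 1) cs [] [] (by omega)]
  simp

-- the streaming fold of B, run from any state, in terms of pvSplit of the remaining suffix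
theorem pv_foldB_eq (cs : List Char) :
    ∀ (res : List String) (buf : List Char) (a d : Bool),
      pvFinish (cs.foldl pvStepB (res, buf, a, d))
      = res
        ++ (if (a || (pvSplit cs).1.any PySem.Chars.isalpha)
               && (d || (pvSplit cs).1.any PySem.Chars.isdigit)
            then [String.ofList (buf ++ (pvSplit cs).1)] else [])
        ++ ((pvSplit cs).2.filter pvPred).map String.ofList := by
  induction cs with
  | nil => intro res buf a d; cases a <;> cases d <;> simp [pvSplit, pvFinish]
  | cons c cs ih =>
    intro res buf a d
    by_cases hc : c = ' '
    · subst hc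
      simp only [List.foldl_cons, pvStepB, if_true]
      rw [ih]
      by_cases hp : ((pvSplit cs).1.any PySem.Chars.isalpha
          && (pvSplit cs).1.any PySem.Chars.isdigit) = true
      · cases a <;> cases d <;> simp [pvSplit, pvPred, hp]
      · cases a <;> cases d <;> simp [pvSplit, pvPred, hp]
    · by_cases hα : PySem.Chars.isalpha c = true
      · have hδ := pv_alpha_digit_disjoint c hα
        simp only [List.foldl_cons, pvStepB, hc, if_false, hα, if_true]
        rw [ih]
        simp [pvSplit, hc, hα, hδ]
      · have hα' : PySem.Chars.isalpha c = false := by simpa using hα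
        by_cases hδ : PySem.Chars.isdigit c = true
        · simp only [List.foldl_cons, pvStepB, hc, if_false, hα', Bool.false_eq_true, hδ, if_true]
          rw [ih]
          simp [pvSplit, hc, hα', hδ]
        · have hδ' : PySem.Chars.isdigit c = false := by simpa using hδ
          simp only [List.foldl_cons, pvStepB, hc, if_false, hα', Bool.false_eq_true, hδ',
            if_false]
          rw [ih]
          simp [pvSplit, hc, hα', hδ']

-- B's port equals the filtered word list
theorem pv_alt_eq (s : String) :
    ret_word_isaldijit_alt s
      = (((pvSplit s.toList).1 :: (pvSplit s.toList).2).filter pvPred).map String.ofList := by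
  have key := pv_foldB_eq s.toList [] [] false false
  rcases h : s.toList.foldl pvStepB ([], [], false, false) with ⟨res, buf, a, d⟩
  rw [h] at key
  have halt : ret_word_isaldijit_alt s = pvFinish (res, buf, a, d) := by
    unfold ret_word_isaldijit_alt
    rw [h]
    rfl
  rw [halt, key]
  by_cases hp : ((pvSplit s.toList).1.any PySem.Chars.isalpha
      && (pvSplit s.toList).1.any PySem.Chars.isdigit) = true
  · simp [pvPred, hp]
  · simp [pvPred, hp]

-- ===== VERDICT (by name: the statement is the Claim_ definition above) =====
theorem ret_word_isaldijit_spec : Claim_equal_ret_word_isaldijit := by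
  intro s _
  unfold Spec_ret_word_isaldijit ret_word_isaldijit
  rw [PySem.List.foldl_append_if_eq_filter]
  simp only [List.nil_append]
  have hsplit : (PySem.Str.split? s " ").getD []
      = (((pvSplit s.toList).1 :: (pvSplit s.toList).2).map String.ofList) := by
    have : (" " : String).toList = [' '] := rfl
    simp [PySem.Str.split?, PySem.Chars.split?, this, pv_splitOn_eq]
  rw [hsplit, pv_alt_eq, List.filter_map]
  congr 1
  apply List.filter_congr
  intro w _
  simp only [Function.comp]
  rw [pvInnerA_eq _ false false (by simp)]
  simp [pvPred, String.toList_ofList]
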